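-- pv_equiv track=rewrite | github.com/PMCC-BioinformaticsCore/janis-core | janis_core/utils/__init__.py | recursive_2param_wrap
-- ===== SOURCE A (Python) =====
-- def recursive_2param_wrap(methodname, items):
--     # It would be awesome if this is generic, but it opens up a new can of worms about how to wrap it
--     # 2 might even be confusing, as you could say zip(zip(A, B), zip(C, D)) instead of zip(A, zip(B, zip(C, D)))
--     # And more than length=2 you could have cases where the last function call might not have a clean 'n' params
--
--     if len(items) < 1:
--         raise Exception(
--             "'recursive_2param_wrap' required two parameters to wrap a workflow"
--         )
--     if len(items) == 2:
--         return f"{methodname}({items[0]}, {items[1]})"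
--     return f"{methodname}({items[0]}, {recursive_2param_wrap(methodname, items[1:])})"
-- ===== SOURCE B (Python) =====
-- def recursive_2param_wrap(methodname, items):
--     if len(items) < 2:
--         raise Exception(
--             "'recursive_2param_wrap' required two parameters to wrap a workflow"
--         )
--     result = f"{methodname}({items[-2]}, {items[-1]})"
--     for x in reversed(items[:-2]):
--         result = f"{methodname}({x}, {result})"
--     return result
-- ===== Notes on version B (the rewrite author's own statement) =====
-- stated objective: simpler
-- what changed: Replaces A's recursion with repeated list slicing (items[1:] copied at each level) by a single iterative loop: seed with the innermost two-argument call and wrap outward over reversed(items[:-2]), no recursion and no per-step slice copies.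
import Mathlib
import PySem

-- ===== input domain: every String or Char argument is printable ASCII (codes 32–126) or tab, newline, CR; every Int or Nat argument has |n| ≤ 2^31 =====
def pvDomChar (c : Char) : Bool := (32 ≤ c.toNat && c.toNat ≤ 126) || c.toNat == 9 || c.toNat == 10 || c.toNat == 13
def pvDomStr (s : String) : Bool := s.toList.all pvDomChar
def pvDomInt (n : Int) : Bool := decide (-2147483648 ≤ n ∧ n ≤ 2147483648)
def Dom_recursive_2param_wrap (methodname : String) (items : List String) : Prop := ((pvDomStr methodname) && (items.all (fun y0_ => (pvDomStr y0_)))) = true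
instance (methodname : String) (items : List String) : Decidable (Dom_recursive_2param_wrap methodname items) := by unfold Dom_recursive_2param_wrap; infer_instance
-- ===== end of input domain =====

-- B replaces A's recursion-with-slicing by one iterative wrap-outward loop (objective: simpler).

-- ===== PORT A =====
-- Literal transliteration of A's recursion. On [] the Python raises (port returns "" there,
-- outside Pre_); [x] recurses into the empty case and raises too — the [x] input falls through
-- to the catch-all branch here exactly as in the Python, yielding a placeholder outside Pre_.
def recursive_2param_wrap (methodname : String) (items : List String) : String :=
  match items with
  | [] => ""  -- Python: raise Exception("'recursive_2param_wrap' required two parameters ...")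
  | [a, b] => methodname ++ "(" ++ a ++ ", " ++ b ++ ")"
  | a :: rest =>  -- items[1:] is rest
      methodname ++ "(" ++ a ++ ", " ++ recursive_2param_wrap methodname rest ++ ")"

-- ===== PORT B =====
-- Literal transliteration of Source B: seed with the innermost call on items[-2], items[-1],
-- then fold the wrap over reversed(items[:-2]).
def recursive_2param_wrap_alt (methodname : String) (items : List String) : String :=
  if items.length < 2 then ""  -- Python: raise Exception(...)
  else
    let init := methodname ++ "(" ++ PySem.List.pyGetD items (-2) "" ++ ", "
                  ++ PySem.List.pyGetD items (-1) "" ++ ")"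
    (PySem.List.slice items none (some (-2))).reverse.foldl
      (fun result x => methodname ++ "(" ++ x ++ ", " ++ result ++ ")") init

-- ===== PRECONDITION & SPEC =====
-- Pre_ excludes exactly the inputs where the Python A raises: len(items) = 0 raises directly,
-- len(items) = 1 raises via the recursive call on the empty slice. B raises identically there.
def Pre_recursive_2param_wrap (methodname : String) (items : List String) : Prop :=
  2 ≤ items.length
instance (methodname : String) (items : List String) : Decidable (Pre_recursive_2param_wrap methodname items) := by unfold Pre_recursive_2param_wrap; infer_instance
def pvWitness_recursive_2param_wrap : String × List String := ("zip", ["A", "B", "C"])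

def Spec_recursive_2param_wrap (methodname : String) (items : List String) (out : String) : Prop := out = recursive_2param_wrap_alt methodname items
instance (methodname : String) (items : List String) (out : String) : Decidable (Spec_recursive_2param_wrap methodname items out) := by unfold Spec_recursive_2param_wrap; infer_instance

-- ===== CLAIM (what is proved, stated in full; the proofs are below) =====
def Claim_equal_recursive_2param_wrap : Prop := ∀ (methodname : String) (items : List String), Dom_recursive_2param_wrap methodname items → Pre_recursive_2param_wrap methodname items → Spec_recursive_2param_wrap methodname items (recursive_2param_wrap methodname items)

-- ===== LEMMAS AND PROOFS =====

-- B's seed/slice pieces on a list of length ≥ 3, peeled one element.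
lemma alt_cons (m a : String) (rest : List String) (h : 2 ≤ rest.length) :
    recursive_2param_wrap_alt m (a :: rest)
      = m ++ "(" ++ a ++ ", " ++ recursive_2param_wrap_alt m rest ++ ")" := by
  have h2 : ¬ (a :: rest).length < 2 := by simp only [List.length_cons]; omega
  have h3 : ¬ rest.length < 2 := by omega
  have hcast : (-2 : Int) = -((2 : Nat) : Int) := by norm_num
  unfold recursive_2param_wrap_alt
  rw [if_neg h2, if_neg h3]
  have hs : PySem.List.slice (a :: rest) none (some (-2))
      = a :: PySem.List.slice rest none (some (-2)) := by
    rw [hcast, PySem.List.slice_to_neg_natCast (a :: rest) 2 (by omega),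
        PySem.List.slice_to_neg_natCast rest 2 (by omega)]
    simp only [List.length_cons]
    have hi : rest.length + 1 - 2 = (rest.length - 2) + 1 := by omega
    rw [hi, List.take_succ_cons]
  have hg2 : PySem.List.pyGetD (a :: rest) (-2) "" = PySem.List.pyGetD rest (-2) "" := by
    rw [PySem.List.pyGetD_neg_ofNat (a :: rest) 2 "" (by omega) (by simp only [List.length_cons]; omega),
        PySem.List.pyGetD_neg_ofNat rest 2 "" (by omega) (by omega)]
    simp only [List.length_cons]
    have hi : rest.length + 1 - 2 = (rest.length - 2) + 1 := by omega
    simp only [hi, List.getElem_cons_succ]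
  have hg1 : PySem.List.pyGetD (a :: rest) (-1) "" = PySem.List.pyGetD rest (-1) "" := by
    rw [PySem.List.pyGetD_neg_ofNat (a :: rest) 1 "" (by omega) (by simp only [List.length_cons]; omega),
        PySem.List.pyGetD_neg_ofNat rest 1 "" (by omega) (by omega)]
    simp only [List.length_cons]
    have hi : rest.length + 1 - 1 = (rest.length - 1) + 1 := by omega
    simp only [hi, List.getElem_cons_succ]
  rw [hs, hg2, hg1]
  simp [List.foldl_append]

lemma main_lemma : ∀ (items : List String) (m : String), 2 ≤ items.length →
    recursive_2param_wrap m items = recursive_2param_wrap_alt m items := by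
  intro items
  induction items with
  | nil => intro m h; simp at h
  | cons a rest ih =>
    intro m h
    by_cases hr : 2 ≤ rest.length
    · -- length ≥ 3: A's catch-all branch; rest is x :: y :: zs
      obtain ⟨x, y, zs, hxyz⟩ : ∃ x y zs, rest = x :: y :: zs := by
        cases rest with
        | nil => simp at hr
        | cons x t =>
          cases t with
          | nil => simp at hr
          | cons y zs => exact ⟨x, y, zs, rfl⟩
      subst hxyz
      rw [alt_cons m a _ hr, ← ih m hr]
      rfl
    · -- length exactly 2: rest = [b]
      obtain ⟨b, hb⟩ : ∃ b, rest = [b] := by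
        cases rest with
        | nil => simp at h
        | cons b t =>
          cases t with
          | nil => exact ⟨b, rfl⟩
          | cons c u => exact absurd (by simp only [List.length_cons]; omega : 2 ≤ (b :: c :: u).length) hr
      subst hb
      unfold recursive_2param_wrap recursive_2param_wrap_alt
      rw [if_neg (by simp : ¬ ([a, b].length < 2))]
      rw [PySem.List.pyGetD_neg_ofNat [a, b] 2 "" (by omega) (by simp),
          PySem.List.pyGetD_neg_ofNat [a, b] 1 "" (by omega) (by simp)]
      rw [(by norm_num : (-2 : Int) = -((2 : Nat) : Int)),
          PySem.List.slice_to_neg_natCast [a, b] 2 (by omega)]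
      simp

-- ===== VERDICT (by name: the statement is the Claim_ definition above) =====
theorem recursive_2param_wrap_spec : Claim_equal_recursive_2param_wrap := by
  intro m items _ hpre
  exact main_lemma items m hpre
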